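-- pv_equiv track=rewrite | github.com/aminul01-g/IntelliReview | analyzer/metrics/complexity.py | _basic_metrics
-- ===== SOURCE A (Python) =====
-- from typing import Dict
--
-- def _basic_metrics(code: str) -> Dict:
--     """Calculate basic metrics for any language."""
--     lines = code.split('\n')
--     loc = len([l for l in lines if l.strip() and not l.strip().startswith('#')])
--
--     return {
--         "lines_of_code": loc,
--         "total_lines": len(lines),
--         "blank_lines": len([l for l in lines if not l.strip()]),
--         "comment_lines": len([l for l in lines if l.strip().startswith('#')]),
--     }
-- ===== SOURCE B (Python) =====
-- def _basic_metrics(code: str):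
--     """Calculate basic metrics for any language."""
--     total = blank = comment = 0
--     state = 0  # 0: only whitespace so far on this line, 1: first non-blank is '#', 2: code
--     for ch in code + '\n':
--         if ch == '\n':
--             total += 1
--             if state == 0:
--                 blank += 1
--             elif state == 1:
--                 comment += 1
--             state = 0
--         elif state == 0 and ch not in ' \t\r':
--             state = 1 if ch == '#' else 2
--     return {
--         "lines_of_code": total - blank - comment,
--         "total_lines": total,
--         "blank_lines": blank,
--         "comment_lines": comment,
--     }
-- ===== Notes on version B (the rewrite author's own statement) =====
-- stated objective: alternative
-- what changed: B never materialises the line list: it streams over the characters of the input with a sentinel newline appended, running a 3-state line-classification machine that counts blank/comment lines at each line end and derives lines_of_code arithmetically as total-blank-comment, instead of A's split plus four filtered scans with strip/startswith per line.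
import Mathlib
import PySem

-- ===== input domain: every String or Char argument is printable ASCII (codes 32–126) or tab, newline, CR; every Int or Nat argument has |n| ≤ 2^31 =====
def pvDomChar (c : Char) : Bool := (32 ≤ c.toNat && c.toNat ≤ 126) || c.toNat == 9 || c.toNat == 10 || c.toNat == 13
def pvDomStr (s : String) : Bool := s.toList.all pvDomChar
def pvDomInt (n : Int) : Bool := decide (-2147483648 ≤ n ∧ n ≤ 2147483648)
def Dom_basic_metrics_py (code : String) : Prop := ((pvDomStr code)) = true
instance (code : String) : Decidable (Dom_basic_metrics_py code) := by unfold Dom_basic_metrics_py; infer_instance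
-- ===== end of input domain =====

-- B replaces A's split-then-four-filtered-scans with a single character-level
-- state machine over code ++ "\n" that classifies each line as it is streamed
-- and derives lines_of_code as total - blank - comment; return value only.

-- ===== PORT A =====
-- l.strip() truthiness and l.strip().startswith('#'), the two tests of A's comprehensions
def pvBlank (l : String) : Bool := PySem.Str.strip l == ""
def pvCom (l : String) : Bool := PySem.Str.startswith (PySem.Str.strip l) "#"

def basic_metrics_py (code : String) : List (String × Int) :=
  let lines := (PySem.Str.split? code "\n").getD []
  let loc : Int := (lines.filter (fun l => !(pvBlank l) && !(pvCom l))).length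
  [("lines_of_code", loc),
   ("total_lines", (lines.length : Int)),
   ("blank_lines", ((lines.filter (fun l => pvBlank l)).length : Int)),
   ("comment_lines", ((lines.filter (fun l => pvCom l)).length : Int))]

-- ===== PORT B =====
-- one step of Source B's loop body on the state (total, blank, comment, state)
def pvStep (a : Int × Int × Int × Int) (ch : Char) : Int × Int × Int × Int :=
  let (total, blank, comment, state) := a
  if ch == '\n' then
    if state == 0 then (total + 1, blank + 1, comment, 0)
    else if state == 1 then (total + 1, blank, comment + 1, 0)
    else (total + 1, blank, comment, 0)
  else if state == 0 && !(ch == ' ' || ch == '\t' || ch == '\r') then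
    (total, blank, comment, if ch == '#' then 1 else 2)
  else a

def basic_metrics_py_alt (code : String) : List (String × Int) :=
  let acc := (code ++ "\n").toList.foldl pvStep (0, 0, 0, 0)
  [("lines_of_code", acc.1 - acc.2.1 - acc.2.2.1),
   ("total_lines", acc.1),
   ("blank_lines", acc.2.1),
   ("comment_lines", acc.2.2.1)]

-- ===== PRECONDITION & SPEC =====
def Spec_basic_metrics_py (code : String) (out : List (String × Int)) : Prop := out = basic_metrics_py_alt code
instance (code : String) (out : List (String × Int)) : Decidable (Spec_basic_metrics_py code out) := by unfold Spec_basic_metrics_py; infer_instance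

-- ===== CLAIM (what is proved, stated in full; the proofs are below) =====
def Claim_equal_basic_metrics_py : Prop := ∀ (code : String), Dom_basic_metrics_py code → Spec_basic_metrics_py code (basic_metrics_py code)

-- ===== LEMMAS AND PROOFS =====

-- the shape of str.split('\n') as a structural recursion over the characters
def pvConsF (p : List Char) : List (List Char) → List (List Char)
  | [] => [p]
  | h :: t => (p ++ h) :: t

def pvSplit : List Char → List (List Char)
  | [] => [[]]
  | c :: t => if c == '\n' then [] :: pvSplit t else pvConsF [c] (pvSplit t)

lemma pvSplit_ne_nil (cs : List Char) : pvSplit cs ≠ [] := by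
  cases cs with
  | nil => simp [pvSplit]
  | cons c t =>
    simp only [pvSplit]
    split
    · simp
    · cases h : pvSplit t <;> simp [pvConsF]

lemma pvConsF_nil {ls : List (List Char)} (h : ls ≠ []) : pvConsF [] ls = ls := by
  cases ls with
  | nil => exact absurd rfl h
  | cons a t => simp [pvConsF]

lemma pvConsF_assoc (p q : List Char) (ls : List (List Char)) :
    pvConsF p (pvConsF q ls) = pvConsF (p ++ q) ls := by
  cases ls <;> simp [pvConsF]


lemma splitOn_go_eq : ∀ (fuel : Nat) (l cur : List Char) (acc : List (List Char)),
    l.length < fuel →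
    PySem.Chars.splitOn.go ['\n'] fuel l cur acc = acc.reverse ++ pvConsF cur.reverse (pvSplit l) := by
  intro fuel
  induction fuel with
  | zero => intro l cur acc h; omega
  | succ f ih =>
    intro l cur acc h
    cases l with
    | nil =>
      simp [PySem.Chars.splitOn.go, pvSplit, pvConsF]
    | cons c rest =>
      rw [PySem.Chars.splitOn.go]
      by_cases hc : c = '\n'
      · subst hc
        have hpre : List.isPrefixOf ['\n'] ('\n' :: rest) = true := by simp [List.isPrefixOf]
        simp only [hpre, if_true, List.length_cons, List.drop_succ_cons, List.length_nil, List.drop_zero]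
        rw [ih rest [] _ (by simp at h ⊢; omega)]
        simp only [List.reverse_nil]
        rw [pvConsF_nil (pvSplit_ne_nil rest)]
        simp [pvSplit, pvConsF]
      · have hpre : List.isPrefixOf ['\n'] (c :: rest) = false := by
          simp [List.isPrefixOf]; exact fun h' => hc h'.symm
        simp only [hpre, Bool.false_eq_true, if_false]
        rw [ih rest (c :: cur) acc (by simp at h ⊢; omega)]
        simp [pvSplit, hc, pvConsF_assoc]

lemma splitOn_eq (cs : List Char) : PySem.Chars.splitOn cs ['\n'] = pvSplit cs := by
  rw [PySem.Chars.splitOn, splitOn_go_eq (cs.length + 1) cs [] [] (by omega)]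
  simp [pvConsF_nil (pvSplit_ne_nil cs)]


def pvWs (c : Char) : Bool := c == ' ' || c == '\t' || c == '\r'

def pvCls : List Char → Int
  | [] => 0
  | c :: t => if pvWs c then pvCls t else if c == '#' then 1 else 2

-- within Dom, off-newline whitespace is exactly {' ','\t','\r'}
lemma charNat_inj {a b : Char} (h : a.toNat = b.toNat) : a = b :=
  Char.ofNat_toNat a ▸ Char.ofNat_toNat b ▸ congrArg Char.ofNat h

lemma isspace_eq_pvWs (c : Char) (hd : pvDomChar c = true) (hn : c ≠ '\n') :
    PySem.Chars.isspace c = pvWs c := by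
  have h10 : c.toNat ≠ 10 := fun h => hn (charNat_inj h)
  have heq : ∀ (d : Char), (c == d) = decide (c.toNat = d.toNat) := by
    intro d
    by_cases h : c = d
    · subst h; simp
    · have hne : c.toNat ≠ d.toNat := fun hh => h (charNat_inj hh)
      simp [h, hne]
  simp only [pvDomChar, Bool.or_eq_true, Bool.and_eq_true, beq_iff_eq, decide_eq_true_eq] at hd
  apply Bool.eq_iff_iff.mpr
  simp only [PySem.Chars.isspace, pvWs, heq, Bool.or_eq_true, Bool.and_eq_true, decide_eq_true_eq]
  have hsp : (' ' : Char).toNat = 32 := rfl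
  have htb : ('\t' : Char).toNat = 9 := rfl
  have hcr : ('\r' : Char).toNat = 13 := rfl
  rw [hsp, htb, hcr]
  omega

lemma strip_cons_ws {c : Char} (h : PySem.Chars.isspace c = true) (cs : List Char) :
    PySem.Chars.strip (c :: cs) = PySem.Chars.strip cs := by
  simp [PySem.Chars.strip, PySem.Chars.lstrip, PySem.Chars.rstrip, List.dropWhile_cons, h]

lemma strip_cons_nonws {c : Char} (h : PySem.Chars.isspace c = false) (cs : List Char) :
    ∃ r, PySem.Chars.strip (c :: cs) = c :: r := by
  simp only [PySem.Chars.strip, PySem.Chars.lstrip, List.dropWhile_cons, h, Bool.false_eq_true,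
    if_false, PySem.Chars.rstrip, List.reverse_cons]
  rw [List.dropWhile_append]
  split
  · exact ⟨[], by simp [List.dropWhile_cons, h]⟩
  · exact ⟨(List.dropWhile PySem.Chars.isspace cs.reverse).reverse, by rw [List.reverse_append]; simp⟩

lemma cls_spec (cs : List Char) (hd : ∀ c ∈ cs, pvDomChar c = true) (hn : '\n' ∉ cs) :
    (PySem.Chars.strip cs = [] ↔ pvCls cs = 0) ∧
    PySem.Chars.startswith (PySem.Chars.strip cs) ['#'] = decide (pvCls cs = 1) := by
  induction cs with
  | nil => simp [PySem.Chars.strip, PySem.Chars.lstrip, PySem.Chars.rstrip, pvCls,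
      PySem.Chars.startswith, List.isPrefixOf]
  | cons c t ih =>
    have hdc : pvDomChar c = true := hd c (by simp)
    have hnc : c ≠ '\n' := fun h => hn (by simp [h])
    have hws : PySem.Chars.isspace c = pvWs c := isspace_eq_pvWs c hdc hnc
    by_cases h : pvWs c = true
    · have := ih (fun x hx => hd x (by simp [hx])) (fun hx => hn (by simp [hx]))
      rw [strip_cons_ws (by rw [hws, h]) t]
      simpa [pvCls, h] using this
    · obtain ⟨r, hr⟩ := strip_cons_nonws (by rw [hws]; simpa using h) t
      rw [hr]
      by_cases hc : c = '#'
      · subst hc; simp [pvCls, h, PySem.Chars.startswith, List.isPrefixOf]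
      · simp [pvCls, h, hc, PySem.Chars.startswith, List.isPrefixOf, Ne.symm hc]

lemma pvCls_mem (cs : List Char) : pvCls cs = 0 ∨ pvCls cs = 1 ∨ pvCls cs = 2 := by
  induction cs with
  | nil => simp [pvCls]
  | cons c t ih => by_cases h : pvWs c = true <;> by_cases hc : c = '#' <;> simp [pvCls, h, hc] <;> tauto

lemma pvCls_append (cur : List Char) (c : Char) :
    pvCls (cur ++ [c]) =
      if pvCls cur = 0 then (if pvWs c then 0 else if c == '#' then 1 else 2) else pvCls cur := by
  induction cur with
  | nil => simp [pvCls]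
  | cons d t ih =>
    by_cases h : pvWs d = true
    · simpa [pvCls, h] using ih
    · by_cases hc : d = '#' <;> simp [pvCls, h, hc, show pvWs '#' = false from rfl]

lemma pvStep_nonl (t b m : Int) (cur : List Char) (c : Char) (hc : c ≠ '\n') :
    pvStep (t, b, m, pvCls cur) c = (t, b, m, pvCls (cur ++ [c])) := by
  have hbeq : (c == '\n') = false := by simpa using hc
  rw [pvCls_append]
  simp only [pvStep, hbeq, Bool.false_eq_true, if_false]
  have hws : (c == ' ' || c == '\t' || c == '\r') = pvWs c := by simp [pvWs]
  rcases pvCls_mem cur with h0 | h0 | h0 <;> rw [h0] <;>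
    by_cases hw : pvWs c = true <;> simp [hw, hws]

-- invariant: running the machine over cs ++ ['\n'] from a state describing the
-- already-seen line prefix `cur` adds the per-line counts of pvConsF cur (pvSplit cs)
lemma machine_inv (cs : List Char) : ∀ (cur : List Char) (t b m : Int),
    (cs ++ ['\n']).foldl pvStep (t, b, m, pvCls cur) =
      (t + (pvConsF cur (pvSplit cs)).length,
       b + ((pvConsF cur (pvSplit cs)).countP (fun l => pvCls l == 0) : Int),
       m + ((pvConsF cur (pvSplit cs)).countP (fun l => pvCls l == 1) : Int), 0) := by
  induction cs with
  | nil =>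
    intro cur t b m
    rcases pvCls_mem cur with h | h | h <;>
      simp [pvStep, pvSplit, pvConsF, h, List.countP_cons]
  | cons c cs' ih =>
    intro cur t b m
    by_cases hc : c = '\n'
    · subst hc
      rw [List.cons_append, List.foldl_cons]
      have h1 : pvStep (t, b, m, pvCls cur) '\n' =
          (t + 1, b + (if pvCls cur = 0 then 1 else 0), m + (if pvCls cur = 1 then 1 else 0), 0) := by
        rcases pvCls_mem cur with h | h | h <;> simp [pvStep, h]
      rw [h1]
      have h2 := ih [] (t + 1) (b + (if pvCls cur = 0 then 1 else 0)) (m + (if pvCls cur = 1 then 1 else 0))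
      rw [show pvCls [] = 0 from rfl] at h2
      rw [h2, pvConsF_nil (pvSplit_ne_nil cs')]
      have h3 : pvConsF cur (pvSplit ('\n' :: cs')) = cur :: pvSplit cs' := by
        simp [pvSplit, pvConsF]
      rw [h3]
      simp only [List.countP_cons, List.length_cons, Prod.mk.injEq]
      refine ⟨by push_cast; ring, ?_, ?_, trivial⟩ <;>
        rcases pvCls_mem cur with h | h | h <;> simp [h] <;> push_cast <;> ring
    · rw [List.cons_append, List.foldl_cons, pvStep_nonl t b m cur c hc, ih (cur ++ [c]) t b m]
      have h3 : pvConsF cur (pvSplit (c :: cs')) = pvConsF (cur ++ [c]) (pvSplit cs') := by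
        simp [pvSplit, hc, pvConsF_assoc]
      rw [h3]

lemma lines_eq (code : String) :
    (PySem.Str.split? code "\n").getD [] = (pvSplit code.toList).map String.ofList := by
  rw [PySem.Str.split?, PySem.Chars.split?]
  rw [show ("\n" : String).toList = ['\n'] from rfl]
  simp [splitOn_eq]

lemma pvSplit_mem (cs : List Char) :
    ∀ l ∈ pvSplit cs, ∀ c ∈ l, c ∈ cs ∧ c ≠ '\n' := by
  induction cs with
  | nil => intro l hl c hc; simp [pvSplit] at hl; subst hl; simp at hc
  | cons c0 t ih =>
    intro l hl c hc
    by_cases h0 : c0 = '\n'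
    · subst h0
      simp only [pvSplit, beq_self_eq_true, if_true, List.mem_cons] at hl
      rcases hl with rfl | hl
      · simp at hc
      · obtain ⟨h1, h2⟩ := ih l hl c hc
        exact ⟨by simp [h1], h2⟩
    · rw [pvSplit, if_neg (by simpa using h0)] at hl
      rcases hsp : pvSplit t with _ | ⟨h, tt⟩
      · exact absurd hsp (pvSplit_ne_nil t)
      · rw [hsp] at hl
        simp only [pvConsF, List.mem_cons] at hl
        rcases hl with rfl | hl
        · simp only [List.cons_append, List.nil_append, List.mem_cons] at hc
          rcases hc with rfl | hc
          · exact ⟨by simp, h0⟩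
          · obtain ⟨h1, h2⟩ := ih h (by rw [hsp]; simp) c hc
            exact ⟨by simp [h1], h2⟩
        · obtain ⟨h1, h2⟩ := ih l (by rw [hsp]; simp [hl]) c hc
          exact ⟨by simp [h1], h2⟩

lemma str_beq_empty (s : String) : (s == "") = decide (s.toList = []) := by
  by_cases h : s = ""
  · subst h; rfl
  · have h2 : s.toList ≠ [] := fun he => h (String.toList_inj.mp (by simpa using he))
    simp [h, h2]

lemma pvBlank_ofList (l : List Char) :
    pvBlank (String.ofList l) = decide (PySem.Chars.strip l = []) := by
  rw [pvBlank, str_beq_empty, PySem.Str.strip, String.toList_ofList, String.toList_ofList]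

lemma pvCom_ofList (l : List Char) :
    pvCom (String.ofList l) = PySem.Chars.startswith (PySem.Chars.strip l) ['#'] := by
  rw [pvCom, PySem.Str.startswith, PySem.Str.strip, String.toList_ofList, String.toList_ofList]
  rfl

lemma partition_count (L : List (List Char)) :
    ((L.filter (fun l => !(decide (pvCls l = 0)) && !(decide (pvCls l = 1)))).length : Int) =
      (L.length : Int) - (L.countP (fun l => pvCls l == 0) : Int) - (L.countP (fun l => pvCls l == 1) : Int) := by
  induction L with
  | nil => simp
  | cons x t ih =>
    rcases pvCls_mem x with h | h | h <;>
      simp [List.filter_cons, List.countP_cons, h, ih] <;> push_cast <;> ring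

lemma main_eq (code : String) (hdom : pvDomStr code = true) :
    basic_metrics_py code = basic_metrics_py_alt code := by
  have hdom' : ∀ c ∈ code.toList, pvDomChar c = true := by
    simpa [pvDomStr, List.all_eq_true] using hdom
  have hB : (code ++ "\n").toList = code.toList ++ ['\n'] := by
    rw [String.toList_append]; rfl
  have hmach := machine_inv code.toList [] 0 0 0
  rw [show pvCls [] = 0 from rfl, pvConsF_nil (pvSplit_ne_nil code.toList)] at hmach
  simp only [zero_add] at hmach
  have hmem : ∀ l ∈ pvSplit code.toList, (∀ c ∈ l, pvDomChar c = true) ∧ '\n' ∉ l := by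
    intro l hl
    refine ⟨fun c hc => hdom' c (pvSplit_mem code.toList l hl c hc).1,
      fun hc => (pvSplit_mem code.toList l hl _ hc).2 rfl⟩
  have hblank : ∀ l ∈ pvSplit code.toList, pvBlank (String.ofList l) = (pvCls l == 0) := by
    intro l hl
    obtain ⟨hd, hn⟩ := hmem l hl
    rw [pvBlank_ofList]
    have h1 := (cls_spec l hd hn).1
    rcases Bool.eq_false_or_eq_true (pvCls l == 0) with h | h <;> rw [h] <;> simp_all
  have hcom : ∀ l ∈ pvSplit code.toList, pvCom (String.ofList l) = (pvCls l == 1) := by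
    intro l hl
    obtain ⟨hd, hn⟩ := hmem l hl
    rw [pvCom_ofList, (cls_spec l hd hn).2]
    rcases Bool.eq_false_or_eq_true (pvCls l == 1) with h | h <;> rw [h] <;> simp_all
  unfold basic_metrics_py basic_metrics_py_alt
  dsimp only
  rw [lines_eq, hB, hmach]
  have hfb : (((pvSplit code.toList).map String.ofList).filter (fun l => pvBlank l)) = ((pvSplit code.toList).filter (fun l => pvCls l == 0)).map String.ofList := by
    rw [List.filter_map]
    exact congrArg _ (List.filter_congr (fun l hl => by simp [Function.comp, hblank l hl]))
  have hfc : (((pvSplit code.toList).map String.ofList).filter (fun l => pvCom l)) = ((pvSplit code.toList).filter (fun l => pvCls l == 1)).map String.ofList := by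
    rw [List.filter_map]
    exact congrArg _ (List.filter_congr (fun l hl => by simp [Function.comp, hcom l hl]))
  have hfl : (((pvSplit code.toList).map String.ofList).filter (fun l => !(pvBlank l) && !(pvCom l))) =
      ((pvSplit code.toList).filter (fun l => !(decide (pvCls l = 0)) && !(decide (pvCls l = 1)))).map String.ofList := by
    rw [List.filter_map]
    refine congrArg _ (List.filter_congr (fun l hl => ?_))
    simp only [Function.comp, hblank l hl, hcom l hl]
    rcases Bool.eq_false_or_eq_true (pvCls l == 0) with h0 | h0 <;>
      rcases Bool.eq_false_or_eq_true (pvCls l == 1) with h1 | h1 <;>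
      rw [h0, h1] <;> simp_all
  rw [hfb, hfc, hfl]
  simp only [List.length_map]
  rw [partition_count]
  have e0 : ((pvSplit code.toList).filter (fun l => pvCls l == 0)).length =
      (pvSplit code.toList).countP (fun l => pvCls l == 0) := List.countP_eq_length_filter.symm
  have e1 : ((pvSplit code.toList).filter (fun l => pvCls l == 1)).length =
      (pvSplit code.toList).countP (fun l => pvCls l == 1) := List.countP_eq_length_filter.symm
  rw [e0, e1]

-- ===== VERDICT (by name: the statement is the Claim_ definition above) =====
theorem basic_metrics_py_spec : Claim_equal_basic_metrics_py := by
  intro code hdom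
  unfold Spec_basic_metrics_py
  exact main_eq code hdom
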